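-- pv_equiv track=rewrite | github.com/victe19/chatbot-dev | intents.py | greeting
-- ===== SOURCE A (Python) =====
-- def preprocess(query: str) -> list:
--     """
--     First of all the function:
--         1. remove marks
--         2. remove uppercases
--         3. separate each word to build a list
--
--     Args:
--         query (str): query to preprocess
--
--     Returns:
--         list: list of words splited without puntuation marks
--     """
--
--     query=query.replace(',', '').replace('.', '').lower()
--     word_list = query.split()
--
--     return word_list
--
-- def greeting(query:str) -> float:
--     """_summary_
--
--     Args:
--         query (str): query without processing
--
--     Returns:
--         confidence (float): probability that this query belongs to the intent greet
--     """
--     query = preprocess(query)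
--     word_list = ["hola", "holaa", "ola", "salutacions"]
--
--     if any(word in query for word in word_list):
--         return 90
--
--     word_list = ["bones", "bona", "bon", "hey"]
--     if any(word in query for word in word_list):
--         return 75
--
--     return 0
-- ===== SOURCE B (Python) =====
-- _SCORES = {"hola": 90, "holaa": 90, "ola": 90, "salutacions": 90,
--            "bones": 75, "bona": 75, "bon": 75, "hey": 75}
--
--
-- def greeting(query: str) -> float:
--     best = 0
--     for token in query.replace(',', '').replace('.', '').lower().split():
--         s = _SCORES.get(token, 0)
--         if best < s:
--             best = s
--     return best
-- ===== Notes on version B (the rewrite author's own statement) =====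
-- stated objective: alternative
-- what changed: Replaces the two sequential any()-membership scans over keyword lists with a single pass over the query tokens that looks each token up in one score table and keeps the running maximum.
import Mathlib
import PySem

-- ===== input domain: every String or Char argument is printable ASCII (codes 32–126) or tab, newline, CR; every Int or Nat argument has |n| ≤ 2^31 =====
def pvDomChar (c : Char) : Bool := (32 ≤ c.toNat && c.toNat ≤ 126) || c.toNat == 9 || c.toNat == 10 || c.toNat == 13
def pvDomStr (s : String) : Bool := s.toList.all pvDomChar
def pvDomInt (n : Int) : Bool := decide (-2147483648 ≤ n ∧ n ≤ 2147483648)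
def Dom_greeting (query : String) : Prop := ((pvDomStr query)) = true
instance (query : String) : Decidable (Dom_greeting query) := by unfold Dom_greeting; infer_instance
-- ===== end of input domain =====

-- B replaces A's two any()-membership scans with a single token pass over one score table (alternative decomposition, same cost class).

-- ===== PORT A =====
def preprocess (query : String) : List String :=
  PySem.Str.split₀ (PySem.Str.lower (PySem.Str.replace (PySem.Str.replace query "," "") "." ""))

def greeting (query : String) : Int :=
  let q := preprocess query
  if (["hola", "holaa", "ola", "salutacions"].any (fun word => q.contains word)) then 90
  else if (["bones", "bona", "bon", "hey"].any (fun word => q.contains word)) then 75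
  else 0

-- ===== PORT B =====
def scoreTable : PySem.Dict String Int :=
  PySem.Dict.ofList [("hola", 90), ("holaa", 90), ("ola", 90), ("salutacions", 90),
                     ("bones", 75), ("bona", 75), ("bon", 75), ("hey", 75)]

def greeting_alt (query : String) : Int :=
  (PySem.Str.split₀ (PySem.Str.lower (PySem.Str.replace (PySem.Str.replace query "," "") "." ""))).foldl
    (fun best token =>
      let s := PySem.Dict.getD scoreTable token 0
      if best < s then s else best) 0

-- ===== PRECONDITION & SPEC =====
def Spec_greeting (query : String) (out : Int) : Prop := out = greeting_alt query
instance (query : String) (out : Int) : Decidable (Spec_greeting query out) := by unfold Spec_greeting; infer_instance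

-- ===== CLAIM (what is proved, stated in full; the proofs are below) =====
def Claim_equal_greeting : Prop := ∀ (query : String), Dom_greeting query → Spec_greeting query (greeting query)

-- ===== LEMMAS AND PROOFS =====

-- A's value as a function of the token list
def avalue (ws : List String) : Int :=
  if (["hola", "holaa", "ola", "salutacions"].any (fun word => ws.contains word)) then 90
  else if (["bones", "bona", "bon", "hey"].any (fun word => ws.contains word)) then 75
  else 0

lemma scoreTable_eq : scoreTable = PySem.Dict.mk
    [("hola", 90), ("holaa", 90), ("ola", 90), ("salutacions", 90),
     ("bones", 75), ("bona", 75), ("bon", 75), ("hey", 75)] := by decide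

lemma avalue_cons (t : String) (ws : List String) :
    avalue (t :: ws) = max (PySem.Dict.getD scoreTable t 0) (avalue ws) := by
  rw [scoreTable_eq]
  simp [avalue, PySem.Dict.getD, PySem.Dict.get?_mk_cons, List.contains_eq_mem, List.mem_cons]
  split_ifs <;> simp_all [PySem.Dict.get?, eq_comm]

lemma fold_eq_avalue (ws : List String) : ∀ acc : Int, 0 ≤ acc →
    ws.foldl (fun best token =>
      let s := PySem.Dict.getD scoreTable token 0
      if best < s then s else best) acc = max acc (avalue ws) := by
  induction ws with
  | nil =>
    intro acc h
    simp only [List.foldl_nil, avalue]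
    norm_num
    omega
  | cons t ws ih =>
    intro acc h
    simp only [List.foldl_cons]
    have hmax : (if acc < PySem.Dict.getD scoreTable t 0 then PySem.Dict.getD scoreTable t 0
        else acc) = max acc (PySem.Dict.getD scoreTable t 0) := by
      split_ifs <;> omega
    rw [hmax, ih _ (le_trans h (le_max_left _ _)), avalue_cons, max_assoc]

-- ===== VERDICT (by name: the statement is the Claim_ definition above) =====
theorem greeting_spec : Claim_equal_greeting := by
  intro query _
  unfold Spec_greeting greeting greeting_alt preprocess
  rw [fold_eq_avalue _ 0 le_rfl]
  simp [avalue]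
  split_ifs <;> norm_num
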